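-- pv_equiv track=rewrite | github.com/Safaet-Rabbi/Python | Codeforce/1311C.py | perform_the_combo
-- ===== SOURCE A (Python) =====
-- def perform_the_combo(t, cases):
--     results = []
--     for n, m, s, p in cases:
--         prefix_sum = [0] * n
--         for pos in p:
--             prefix_sum[0] += 1
--             if pos < n:
--                 prefix_sum[pos] -= 1
--
--         for i in range(1, n):
--             prefix_sum[i] += prefix_sum[i - 1]
--
--         freq = [0] * 26
--         for i in range(n):
--             freq[ord(s[i]) - ord('a')] += prefix_sum[i] + 1
--
--         results.append(" ".join(map(str, freq)))
--     return results
-- ===== SOURCE B (Python) =====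
-- def perform_the_combo(t, cases):
--     results = []
--     for n, m, s, p in cases:
--         combo = s[:n]
--         freq = [0] * 26
--         for pos in p:
--             for c in combo[:pos]:
--                 freq[ord(c) - ord('a')] += 1
--         for c in combo:
--             freq[ord(c) - ord('a')] += 1
--         results.append(" ".join(map(str, freq)))
--     return results
-- ===== Notes on version B (the rewrite author's own statement) =====
-- stated objective: simpler
-- what changed: Replaces the difference-array + prefix-sum + weighted single pass with direct counting: for each wrong attempt count the key presses over the combo prefix s[:pos] (Python slicing naturally clamps pos>=n and handles pos<0 the same way A's negative-index decrement does), plus one final pass over the whole combo.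
import Mathlib
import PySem

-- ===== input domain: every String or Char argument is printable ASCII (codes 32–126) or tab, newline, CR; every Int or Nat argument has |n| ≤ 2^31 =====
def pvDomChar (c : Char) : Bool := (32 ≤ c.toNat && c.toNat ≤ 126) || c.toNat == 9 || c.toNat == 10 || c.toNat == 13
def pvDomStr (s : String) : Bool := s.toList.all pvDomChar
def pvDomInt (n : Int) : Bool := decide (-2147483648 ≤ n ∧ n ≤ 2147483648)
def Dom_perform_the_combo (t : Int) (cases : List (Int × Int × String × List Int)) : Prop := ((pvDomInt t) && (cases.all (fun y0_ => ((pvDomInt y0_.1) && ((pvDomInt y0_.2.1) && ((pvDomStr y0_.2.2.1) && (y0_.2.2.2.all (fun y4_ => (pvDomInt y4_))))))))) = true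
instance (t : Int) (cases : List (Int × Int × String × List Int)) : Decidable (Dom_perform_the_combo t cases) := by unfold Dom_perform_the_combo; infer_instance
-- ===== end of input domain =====

-- B replaces A's difference-array + prefix-sum + weighted pass with direct per-attempt
-- counting over combo prefixes (objective: simpler). Equality is on return values.

-- ===== PORT A =====
-- one test case of A's loop body: difference array, prefix sums, weighted frequency pass
def comboCaseA (c : Int × Int × String × List Int) : String :=
  let n := c.1
  let s := c.2.2.1
  let p := c.2.2.2
  -- prefix_sum = [0] * n ; for pos in p: prefix_sum[0] += 1; if pos < n: prefix_sum[pos] -= 1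
  let ps := p.foldl (fun ps pos =>
      let ps := PySem.List.pySetD ps 0 (PySem.List.pyGetD ps 0 0 + 1)
      if pos < n then PySem.List.pySetD ps pos (PySem.List.pyGetD ps pos 0 - 1) else ps)
    (List.replicate n.toNat 0)
  -- for i in range(1, n): prefix_sum[i] += prefix_sum[i-1]
  let ps := (PySem.List.pyRange 1 n 1).foldl (fun ps i =>
      PySem.List.pySetD ps i (PySem.List.pyGetD ps i 0 + PySem.List.pyGetD ps (i - 1) 0)) ps
  -- freq = [0] * 26 ; for i in range(n): freq[ord(s[i]) - ord('a')] += prefix_sum[i] + 1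
  let freq := (PySem.List.pyRange 0 n 1).foldl (fun fr i =>
      let idx := ((PySem.List.pyGetD s.toList i ' ').toNat : Int) - 97
      PySem.List.pySetD fr idx (PySem.List.pyGetD fr idx 0 + (PySem.List.pyGetD ps i 0 + 1)))
    (List.replicate 26 0)
  PySem.Str.join " " (freq.map PySem.Int.toStr)

def perform_the_combo (t : Int) (cases : List (Int × Int × String × List Int)) : List String :=
  cases.foldl (fun results c => results ++ [comboCaseA c]) []

-- ===== PORT B =====
-- one test case of B's loop body: count key presses directly over combo prefixes
def comboCaseB (c : Int × Int × String × List Int) : String :=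
  let n := c.1
  let s := c.2.2.1
  let p := c.2.2.2
  let combo := PySem.List.slice s.toList none (some n)      -- combo = s[:n]
  -- for pos in p: for c in combo[:pos]: freq[ord(c) - ord('a')] += 1
  let freq := p.foldl (fun fr pos =>
      (PySem.List.slice combo none (some pos)).foldl (fun fr ch =>
        PySem.List.pySetD fr ((ch.toNat : Int) - 97)
          (PySem.List.pyGetD fr ((ch.toNat : Int) - 97) 0 + 1)) fr)
    (List.replicate 26 0)
  -- for c in combo: freq[ord(c) - ord('a')] += 1
  let freq := combo.foldl (fun fr ch =>
      PySem.List.pySetD fr ((ch.toNat : Int) - 97)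
        (PySem.List.pyGetD fr ((ch.toNat : Int) - 97) 0 + 1)) freq
  PySem.Str.join " " (freq.map PySem.Int.toStr)

def perform_the_combo_alt (t : Int) (cases : List (Int × Int × String × List Int)) : List String :=
  cases.foldl (fun results c => results ++ [comboCaseB c]) []

-- ===== PRECONDITION & SPEC =====
-- Pre_ excludes inputs where A raises (n > len(s); p nonempty with n ≤ 0; some pos < -n;
-- a character of s[:n] outside codes 71..122, where freq indexing raises IndexError), and
-- the malformed corner of a negative declared length n with a nonempty slice s[:n], where A
-- (p empty) returns all zeros while B counts the characters of s[:n].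
def Pre_perform_the_combo (t : Int) (cases : List (Int × Int × String × List Int)) : Prop :=
  ∀ c ∈ cases,
    (0 ≤ c.1 ∨ (c.2.2.2 = [] ∧ (c.2.2.1.toList.length : Int) + c.1 ≤ 0)) ∧ c.1 ≤ (c.2.2.1.toList.length : Int) ∧
    ((c.2.2.1.toList.take c.1.toNat).all (fun ch => 71 ≤ ch.toNat && ch.toNat ≤ 122)) = true ∧
    (c.2.2.2 ≠ [] → 1 ≤ c.1) ∧
    (c.2.2.2.all (fun pos => decide (-c.1 ≤ pos))) = true
instance (t : Int) (cases : List (Int × Int × String × List Int)) : Decidable (Pre_perform_the_combo t cases) := by unfold Pre_perform_the_combo; infer_instance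

def pvWitness_perform_the_combo : Int × (List (Int × Int × String × List Int)) :=
  (1, [(2, 1, "ab", [1, 5, 0])])

def Spec_perform_the_combo (t : Int) (cases : List (Int × Int × String × List Int)) (out : List String) : Prop := out = perform_the_combo_alt t cases
instance (t : Int) (cases : List (Int × Int × String × List Int)) (out : List String) : Decidable (Spec_perform_the_combo t cases out) := by unfold Spec_perform_the_combo; infer_instance

-- ===== CLAIM (what is proved, stated in full; the proofs are below) =====
def Claim_equal_perform_the_combo : Prop := ∀ (t : Int) (cases : List (Int × Int × String × List Int)), Dom_perform_the_combo t cases → Pre_perform_the_combo t cases → Spec_perform_the_combo t cases (perform_the_combo t cases)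

-- ===== LEMMAS AND PROOFS =====

def wIdx (N : Nat) (i : Int) : Nat := if 0 ≤ i then i.toNat else N - (-i).toNat

theorem wIdx_lt {N : Nat} {i : Int} (h2 : i < N) (hN : 0 < N) : wIdx N i < N := by
  unfold wIdx; split_ifs <;> omega

theorem pySetD_wIdx {α : Type} {xs : List α} {N : Nat} {i : Int} (hlen : xs.length = N)
    (h1 : -(N : Int) ≤ i) (h2 : i < N) (v : α) :
    PySem.List.pySetD xs i v = xs.set (wIdx N i) v := by
  subst hlen
  unfold wIdx
  simp only [PySem.List.pySetD, PySem.List.pySet?, PySem.List.pyIdx?]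
  split_ifs with h <;> simp [h1, h2, h]

theorem pyGetD_wIdx {α : Type} {xs : List α} {N : Nat} {i : Int} (hlen : xs.length = N)
    (h1 : -(N : Int) ≤ i) (h2 : i < N) (d : α) :
    PySem.List.pyGetD xs i d = xs.getD (wIdx N i) d := by
  subst hlen
  unfold wIdx
  rcases (by omega : 0 ≤ i ∨ i < 0) with h | h
  · rw [PySem.List.pyGetD_eq_getElem xs d h (by simpa using h2), if_pos h,
      List.getD_eq_getElem _ _ (by omega)]
  · have hle : (-i).toNat ≤ xs.length := by omega
    have h0 : 0 < (-i).toNat := by omega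
    have hgn := PySem.List.pyGetD_neg_natCast xs (-i).toNat d h0 hle
    rw [show -(((-i).toNat : Nat) : Int) = i from by omega] at hgn
    rw [hgn, if_neg (by omega), List.getD_eq_getElem _ _ (by omega)]

def eIdx (ch : Char) : Nat := wIdx 26 ((ch.toNat : Int) - 97)

theorem eIdx_lt {ch : Char} (h : 71 ≤ ch.toNat) (h' : ch.toNat ≤ 122) : eIdx ch < 26 := by
  unfold eIdx wIdx; split_ifs <;> omega

theorem getD_set {α : Type} (xs : List α) (a j : Nat) (v d : α) (ha : a < xs.length) :
    (xs.set a v).getD j d = if j = a then v else xs.getD j d := by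
  rcases (by omega : j < xs.length ∨ xs.length ≤ j) with hj | hj
  · rw [List.getD_eq_getElem _ _ (by simpa using hj)]
    rw [List.getElem_set]
    split_ifs with h1 h2 h2
    · rfl
    · omega
    · omega
    · rw [List.getD_eq_getElem _ _ hj]
  · rw [if_neg (by omega), List.getD_eq_default _ _ (by simpa using hj),
      List.getD_eq_default _ _ (by omega)]

theorem bump_eq {fr : List Int} (hfr : fr.length = 26) {ch : Char}
    (hc : 71 ≤ ch.toNat ∧ ch.toNat ≤ 122) (w : Int) :
    PySem.List.pySetD fr ((ch.toNat : Int) - 97) (PySem.List.pyGetD fr ((ch.toNat : Int) - 97) 0 + w)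
      = fr.set (eIdx ch) (fr.getD (eIdx ch) 0 + w) := by
  rw [pySetD_wIdx hfr (by omega) (by omega), pyGetD_wIdx hfr (by omega) (by omega)]
  rfl

-- weight-1 bump loop over a character list (B's inner loops)
theorem bumpList (cs : List Char) (fr : List Int) (hfr : fr.length = 26)
    (hc : ∀ ch ∈ cs, 71 ≤ ch.toNat ∧ ch.toNat ≤ 122) :
    (cs.foldl (fun fr ch =>
        PySem.List.pySetD fr ((ch.toNat : Int) - 97)
          (PySem.List.pyGetD fr ((ch.toNat : Int) - 97) 0 + 1)) fr).length = 26 ∧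
    ∀ j < 26, (cs.foldl (fun fr ch =>
        PySem.List.pySetD fr ((ch.toNat : Int) - 97)
          (PySem.List.pyGetD fr ((ch.toNat : Int) - 97) 0 + 1)) fr).getD j 0
      = fr.getD j 0 + (cs.countP (fun ch => eIdx ch == j) : Int) := by
  induction cs generalizing fr with
  | nil => simpa using hfr
  | cons ch cs ih =>
    simp only [List.foldl_cons]
    have hch := hc ch (by simp)
    rw [bump_eq hfr hch 1]
    have hlen : (fr.set (eIdx ch) (fr.getD (eIdx ch) 0 + 1)).length = 26 := by
      simpa using hfr
    obtain ⟨H1, H2⟩ := ih _ hlen (fun c hcm => hc c (by simp [hcm]))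
    refine ⟨H1, fun j hj => ?_⟩
    rw [H2 j hj, getD_set _ _ _ _ _ (hfr ▸ eIdx_lt hch.1 hch.2), List.countP_cons]
    by_cases h : eIdx ch = j
    · subst h
      simp only [if_pos rfl, BEq.rfl, if_pos]
      push_cast
      ring
    · rw [if_neg (fun hh => h hh.symm)]
      have hb : (eIdx ch == j) = false := by simpa using h
      simp [hb]

def covN (n : Int) (N : Nat) (pos : Int) : Nat := if pos < n then wIdx N pos else N

theorem covN_le {n : Int} {N : Nat} {pos : Int} (hN : (N : Int) = n) (hpos : -n ≤ pos) :
    covN n N pos ≤ N := by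
  unfold covN wIdx; split_ifs <;> omega

theorem slice_take {L : List Char} {N : Nat} {n pos : Int} (hL : L.length = N)
    (hN : (N : Int) = n) (hpos : -n ≤ pos) :
    PySem.List.slice L none (some pos) = L.take (covN n N pos) := by
  unfold covN wIdx
  rcases (by omega : 0 ≤ pos ∨ pos < 0) with h | h
  · rw [PySem.List.slice_to _ h]
    by_cases h1 : pos < n
    · rw [if_pos h1, if_pos h]
    · rw [if_neg h1, List.take_of_length_le (by omega), List.take_of_length_le (by omega)]
  · have hk0 : 0 < (-pos).toNat := by omega
    have hs := PySem.List.slice_to_neg_natCast L (-pos).toNat hk0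
    rw [show -(((-pos).toNat : Nat) : Int) = pos from by omega] at hs
    rw [hs, if_pos (by omega), if_neg (by omega), hL]

-- B's outer loop over the wrong attempts
theorem bLoop (p : List Int) (L : List Char) (n : Int) (N : Nat) (hL : L.length = N)
    (hN : (N : Int) = n) (hpos : ∀ pos ∈ p, -n ≤ pos)
    (hc : ∀ ch ∈ L, 71 ≤ ch.toNat ∧ ch.toNat ≤ 122)
    (fr : List Int) (hfr : fr.length = 26) :
    (p.foldl (fun fr pos =>
        (PySem.List.slice L none (some pos)).foldl (fun fr ch =>
          PySem.List.pySetD fr ((ch.toNat : Int) - 97)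
            (PySem.List.pyGetD fr ((ch.toNat : Int) - 97) 0 + 1)) fr) fr).length = 26 ∧
    ∀ j < 26, (p.foldl (fun fr pos =>
        (PySem.List.slice L none (some pos)).foldl (fun fr ch =>
          PySem.List.pySetD fr ((ch.toNat : Int) - 97)
            (PySem.List.pyGetD fr ((ch.toNat : Int) - 97) 0 + 1)) fr) fr).getD j 0
      = fr.getD j 0
        + (p.map (fun pos => (((L.take (covN n N pos)).countP (fun ch => eIdx ch == j)) : Int))).sum := by
  induction p generalizing fr with
  | nil => simpa using hfr
  | cons pos rest ih =>
    simp only [List.foldl_cons]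
    rw [slice_take hL hN (hpos pos (by simp))]
    have hcs : ∀ ch ∈ L.take (covN n N pos), 71 ≤ ch.toNat ∧ ch.toNat ≤ 122 :=
      fun ch hch => hc ch (List.mem_of_mem_take hch)
    obtain ⟨B1, B2⟩ := bumpList (L.take (covN n N pos)) fr hfr hcs
    obtain ⟨H1, H2⟩ := ih (fun q hq => hpos q (by simp [hq])) _ B1
    refine ⟨H1, fun j hj => ?_⟩
    rw [H2 j hj, B2 j hj, List.map_cons, List.sum_cons]
    ring

-- A's difference-array loop
theorem diffLoop (n : Int) (N : Nat) (hN : (N : Int) = n) (hn1 : 1 ≤ n)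
    (p : List Int) (hpos : ∀ pos ∈ p, -n ≤ pos) (init : List Int) (hlen : init.length = N) :
    (p.foldl (fun ps pos =>
        let ps := PySem.List.pySetD ps 0 (PySem.List.pyGetD ps 0 0 + 1)
        if pos < n then PySem.List.pySetD ps pos (PySem.List.pyGetD ps pos 0 - 1) else ps)
      init).length = N ∧
    ∀ i < N, (p.foldl (fun ps pos =>
        let ps := PySem.List.pySetD ps 0 (PySem.List.pyGetD ps 0 0 + 1)
        if pos < n then PySem.List.pySetD ps pos (PySem.List.pyGetD ps pos 0 - 1) else ps)
      init).getD i 0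
      = init.getD i 0 + (p.length : Int) * (if i = 0 then 1 else 0)
        - (p.countP (fun pos => decide (pos < n) && decide (wIdx N pos = i)) : Int) := by
  induction p generalizing init with
  | nil => simpa using hlen
  | cons pos rest ih =>
    simp only [List.foldl_cons]
    have hp0 := hpos pos (by simp)
    have h00 : PySem.List.pySetD init 0 (PySem.List.pyGetD init 0 0 + 1)
        = init.set 0 (init.getD 0 0 + 1) := by
      rw [pySetD_wIdx hlen (by omega) (by omega), pyGetD_wIdx hlen (by omega) (by omega)]
      rfl
    rw [h00]
    set init1 := init.set 0 (init.getD 0 0 + 1) with hinit1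
    have hlen1 : init1.length = N := by simp [hinit1, hlen]
    set init2 := if pos < n then
        PySem.List.pySetD init1 pos (PySem.List.pyGetD init1 pos 0 - 1) else init1 with hinit2
    have hlen2 : init2.length = N := by
      rw [hinit2]; split_ifs with h
      · rw [pySetD_wIdx hlen1 (by omega) (by omega)]; simp [hlen1]
      · exact hlen1
    have hget1 : ∀ k < N, init1.getD k 0 = init.getD k 0 + (if k = 0 then 1 else 0) := by
      intro k hk
      rw [hinit1, getD_set _ _ _ _ _ (by omega)]
      rcases eq_or_ne k 0 with rfl | hk0
      · rw [if_pos rfl, if_pos rfl]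
      · rw [if_neg hk0, if_neg hk0]; ring
    have hstep : ∀ i < N, init2.getD i 0 = init.getD i 0 + (if i = 0 then 1 else 0)
        - (if (pos < n ∧ wIdx N pos = i) then 1 else 0) := by
      intro i hi
      rw [hinit2]
      by_cases h : pos < n
      · rw [if_pos h, pySetD_wIdx hlen1 (by omega) (by omega),
          pyGetD_wIdx hlen1 (by omega) (by omega)]
        have hw : wIdx N pos < N := wIdx_lt (by omega) (by omega)
        rw [getD_set _ _ _ _ _ (by omega)]
        by_cases h1 : i = wIdx N pos
        · rw [if_pos h1, if_pos (show pos < n ∧ wIdx N pos = i from ⟨h, h1.symm⟩), h1,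
            hget1 _ hw]
        · rw [if_neg h1,
            if_neg (show ¬(pos < n ∧ wIdx N pos = i) from fun hh => h1 hh.2.symm), hget1 _ hi]
          ring
      · rw [if_neg h, if_neg (show ¬(pos < n ∧ wIdx N pos = i) from fun hh => h hh.1),
          hget1 _ hi]
        ring
    obtain ⟨H1, H2⟩ := ih (fun q hq => hpos q (by simp [hq])) init2 hlen2
    refine ⟨H1, fun i hi => ?_⟩
    rw [H2 i hi, hstep i hi, List.countP_cons, List.length_cons]
    simp only [Bool.and_eq_true, decide_eq_true_eq]
    push_cast
    split_ifs <;> omega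

-- A's in-place prefix-sum pass, invariant form
theorem prefLoopAux (N : Nat) (a : List Int) (hlen : a.length = N) (m : Nat) (hm : m < N) :
    (((List.range m).map (fun k : Nat => 1 + (k : Int))).foldl (fun ps i =>
        PySem.List.pySetD ps i (PySem.List.pyGetD ps i 0 + PySem.List.pyGetD ps (i - 1) 0)) a).length = N ∧
    (∀ i ≤ m, (((List.range m).map (fun k : Nat => 1 + (k : Int))).foldl (fun ps i =>
        PySem.List.pySetD ps i (PySem.List.pyGetD ps i 0 + PySem.List.pyGetD ps (i - 1) 0)) a).getD i 0
      = ∑ j ∈ Finset.range (i + 1), a.getD j 0) ∧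
    (∀ i, m < i → (((List.range m).map (fun k : Nat => 1 + (k : Int))).foldl (fun ps i =>
        PySem.List.pySetD ps i (PySem.List.pyGetD ps i 0 + PySem.List.pyGetD ps (i - 1) 0)) a).getD i 0
      = a.getD i 0) := by
  induction m with
  | zero =>
    refine ⟨by simpa using hlen, fun i hi => ?_, fun i hi => by simp⟩
    interval_cases i
    simp [Finset.sum_range_one]
  | succ m ih =>
    obtain ⟨H1, H2, H3⟩ := ih (by omega)
    set res := ((List.range m).map (fun k : Nat => 1 + (k : Int))).foldl (fun ps i =>
        PySem.List.pySetD ps i (PySem.List.pyGetD ps i 0 + PySem.List.pyGetD ps (i - 1) 0)) a with hres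
    rw [List.range_succ, List.map_append, List.foldl_append, ← hres]
    simp only [List.map_cons, List.map_nil, List.foldl_cons, List.foldl_nil]
    have e1 : (1 : Int) + (m : Int) = ((m + 1 : Nat) : Int) := by push_cast; ring
    have e2 : ((m + 1 : Nat) : Int) - 1 = ((m : Nat) : Int) := by push_cast; ring
    rw [e1, e2, PySem.List.pySetD_natCast]
    have hg1 : PySem.List.pyGetD res ((m + 1 : Nat) : Int) 0 = res.getD (m + 1) 0 := by
      rw [PySem.List.pyGetD_natCast]
    have hg2 : PySem.List.pyGetD res ((m : Nat) : Int) 0 = res.getD m 0 := by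
      rw [PySem.List.pyGetD_natCast]
    rw [hg1, hg2]
    have hlr : res.length = N := H1
    refine ⟨by simpa [hlr], fun i hi => ?_, fun i hi => ?_⟩
    · rw [getD_set _ _ _ _ _ (by omega)]
      rcases eq_or_ne i (m + 1) with rfl | hne
      · rw [if_pos rfl, H3 (m + 1) (by omega), H2 m (by omega), Finset.sum_range_succ,
          Finset.sum_range_succ, Finset.sum_range_succ]
        ring
      · rw [if_neg hne, H2 i (by omega)]
    · rw [getD_set _ _ _ _ _ (by omega), if_neg (by omega), H3 i (by omega)]

theorem prefLoop (n : Int) (N : Nat) (hN : (N : Int) = n) (a : List Int) (hlen : a.length = N) :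
    ((PySem.List.pyRange 1 n 1).foldl (fun ps i =>
        PySem.List.pySetD ps i (PySem.List.pyGetD ps i 0 + PySem.List.pyGetD ps (i - 1) 0)) a).length = N ∧
    ∀ i < N, ((PySem.List.pyRange 1 n 1).foldl (fun ps i =>
        PySem.List.pySetD ps i (PySem.List.pyGetD ps i 0 + PySem.List.pyGetD ps (i - 1) 0)) a).getD i 0
      = ∑ j ∈ Finset.range (i + 1), a.getD j 0 := by
  rw [PySem.List.pyRange_one]
  rcases (by omega : N = 0 ∨ 0 < N) with h0 | h0
  · subst h0
    have : (n - 1).toNat = 0 := by omega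
    rw [this]
    exact ⟨by simpa using hlen, fun i hi => by omega⟩
  · have hm : (n - 1).toNat = N - 1 := by omega
    rw [hm]
    obtain ⟨H1, H2, _⟩ := prefLoopAux N a hlen (N - 1) (by omega)
    exact ⟨H1, fun i hi => H2 i (by omega)⟩

-- A's weighted frequency pass
theorem freqLoopAux (N : Nat) (sL : List Char) (ps2 : List Int)
    (hc : ∀ i < N, 71 ≤ (sL.getD i ' ').toNat ∧ (sL.getD i ' ').toNat ≤ 122)
    (m : Nat) (hm : m ≤ N) (fr : List Int) (hfr : fr.length = 26) :
    (((List.range m).map (fun k : Nat => (k : Int))).foldl (fun fr i =>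
        let idx := ((PySem.List.pyGetD sL i ' ').toNat : Int) - 97
        PySem.List.pySetD fr idx (PySem.List.pyGetD fr idx 0 + (PySem.List.pyGetD ps2 i 0 + 1)))
      fr).length = 26 ∧
    ∀ j < 26, (((List.range m).map (fun k : Nat => (k : Int))).foldl (fun fr i =>
        let idx := ((PySem.List.pyGetD sL i ' ').toNat : Int) - 97
        PySem.List.pySetD fr idx (PySem.List.pyGetD fr idx 0 + (PySem.List.pyGetD ps2 i 0 + 1)))
      fr).getD j 0
      = fr.getD j 0 + ∑ i ∈ Finset.range m,
          (if eIdx (sL.getD i ' ') = j then ps2.getD i 0 + 1 else 0) := by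
  induction m with
  | zero => exact ⟨by simpa using hfr, fun j hj => by simp⟩
  | succ m ih =>
    obtain ⟨H1, H2⟩ := ih (by omega)
    set res := ((List.range m).map (fun k : Nat => (k : Int))).foldl (fun fr i =>
        let idx := ((PySem.List.pyGetD sL i ' ').toNat : Int) - 97
        PySem.List.pySetD fr idx (PySem.List.pyGetD fr idx 0 + (PySem.List.pyGetD ps2 i 0 + 1)))
      fr with hres
    rw [List.range_succ, List.map_append, List.foldl_append, ← hres]
    simp only [List.map_cons, List.map_nil, List.foldl_cons, List.foldl_nil]
    rw [PySem.List.pyGetD_natCast, PySem.List.pyGetD_natCast]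
    have hch := hc m (by omega)
    rw [bump_eq H1 hch (ps2.getD m 0 + 1)]
    have hlt : eIdx (sL.getD m ' ') < 26 := eIdx_lt hch.1 hch.2
    refine ⟨by simpa using H1, fun j hj => ?_⟩
    rw [getD_set _ _ _ _ _ (by omega), Finset.sum_range_succ]
    rcases eq_or_ne j (eIdx (sL.getD m ' ')) with rfl | hne
    · rw [if_pos rfl, if_pos rfl, H2 _ hj]
      ring
    · rw [if_neg hne, if_neg (fun hh => hne hh.symm), H2 _ hj]
      ring

theorem countP_not_sum {α : Type} (l : List α) (q : α → Bool) :
    l.countP q + l.countP (fun x => !q x) = l.length := by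
  induction l with
  | nil => simp
  | cons a l ih =>
    simp only [List.countP_cons, List.length_cons]
    by_cases h : q a = true <;> simp [h] <;> omega

theorem countP_getD {α : Type} (L : List α) (q : α → Bool) (d : α) :
    (L.countP q : Int) = ∑ i ∈ Finset.range L.length, (if q (L.getD i d) = true then (1 : Int) else 0) := by
  induction L with
  | nil => simp
  | cons a l ih =>
    rw [List.countP_cons, List.length_cons, Finset.sum_range_succ']
    simp only [List.getD_cons_succ, List.getD_cons_zero]
    rw [← ih]
    by_cases h : q a = true
    · simp [h]
    · simp [h]

theorem take_count {α : Type} (L : List α) (q : α → Bool) (d : α) (k N : Nat)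
    (hN : L.length = N) (hk : k ≤ N) :
    ((L.take k).countP q : Int)
      = ∑ i ∈ Finset.range N, (if q (L.getD i d) = true ∧ i < k then (1 : Int) else 0) := by
  rw [countP_getD (L.take k) q d]
  have hlt : (L.take k).length = k := by
    rw [List.length_take, hN]; omega
  rw [hlt]
  have hcong : ∀ i ∈ Finset.range k, (if q ((L.take k).getD i d) = true then (1 : Int) else 0)
      = (if q (L.getD i d) = true ∧ i < k then (1 : Int) else 0) := by
    intro i hi
    have hik : i < k := Finset.mem_range.mp hi
    have hgd : (L.take k).getD i d = L.getD i d := by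
      rw [List.getD_eq_getElem _ _ (by omega), List.getD_eq_getElem _ _ (by omega)]
      simp
    rw [hgd]
    by_cases h : q (L.getD i d) = true
    · rw [if_pos h, if_pos ⟨h, hik⟩]
    · rw [if_neg h, if_neg (fun hh => h hh.1)]
  rw [Finset.sum_congr rfl hcong]
  exact Finset.sum_subset
    (fun x hx => Finset.mem_range.mpr (lt_of_lt_of_le (Finset.mem_range.mp hx) hk))
    (fun i _ hi => by rw [if_neg]; exact fun hh => hi (Finset.mem_range.mpr hh.2))

theorem sumCount (p : List Int) (n : Int) (N K : Nat) :
    ∑ k ∈ Finset.range K, (p.countP (fun pos => decide (pos < n) && decide (wIdx N pos = k)))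
      = p.countP (fun pos => decide (pos < n) && decide (wIdx N pos < K)) := by
  induction p with
  | nil => simp
  | cons pos rest ih =>
    simp only [List.countP_cons]
    rw [Finset.sum_add_distrib, ih]
    congr 1
    by_cases h : pos < n
    · simp only [h, decide_true, Bool.true_and, decide_eq_true_eq]
      rw [Finset.sum_ite_eq (Finset.range K) (wIdx N pos) (fun _ => 1)]
      simp
    · simp [h]

theorem swapSum (p : List Int) (L : List Char) (n : Int) (N : Nat) (hL : L.length = N)
    (hN : (N : Int) = n) (hpos : ∀ pos ∈ p, -n ≤ pos) (j : Nat) :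
    ∑ i ∈ Finset.range N, (if eIdx (L.getD i ' ') = j
        then ((p.countP (fun pos => decide (i < covN n N pos))) : Int) else 0)
      = (p.map (fun pos => (((L.take (covN n N pos)).countP (fun ch => eIdx ch == j)) : Int))).sum := by
  induction p with
  | nil => simp
  | cons pos rest ih =>
    simp only [List.map_cons, List.sum_cons, List.countP_cons]
    have hterm : ∀ i ∈ Finset.range N,
        (if eIdx (L.getD i ' ') = j
          then ((rest.countP (fun q => decide (i < covN n N q))
                 + if decide (i < covN n N pos) = true then 1 else 0 : Nat) : Int) else 0)
        = (if eIdx (L.getD i ' ') = j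
            then ((rest.countP (fun q => decide (i < covN n N q))) : Int) else 0)
          + (if ((fun ch => eIdx ch == j) (L.getD i ' ')) = true ∧ i < covN n N pos
              then (1 : Int) else 0) := by
      intro i _
      by_cases he : eIdx (L.getD i ' ') = j
      · rw [if_pos he]
        by_cases hc : i < covN n N pos
        · rw [if_pos (by simpa using hc), if_pos he, if_pos ⟨by simpa using he, hc⟩]
          push_cast; ring
        · rw [if_neg (by simpa using hc), if_pos he,
            if_neg (fun hh => hc hh.2)]
          push_cast; ring
      · rw [if_neg he, if_neg he, if_neg (fun hh => he (by simpa using hh.1))]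
        ring
    rw [Finset.sum_congr rfl hterm, Finset.sum_add_distrib, ih (fun q hq => hpos q (by simp [hq]))]
    rw [← take_count L (fun ch => eIdx ch == j) ' ' (covN n N pos) N hL
      (covN_le hN (hpos pos (by simp)))]
    ring

theorem comboCase_eq (c : Int × Int × String × List Int)
    (h : 0 ≤ c.1 ∧ c.1 ≤ (c.2.2.1.toList.length : Int) ∧
      (∀ ch ∈ c.2.2.1.toList.take c.1.toNat, 71 ≤ ch.toNat ∧ ch.toNat ≤ 122) ∧
      (c.2.2.2 ≠ [] → 1 ≤ c.1) ∧ (∀ pos ∈ c.2.2.2, -c.1 ≤ pos)) :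
    comboCaseA c = comboCaseB c := by
  obtain ⟨n, m', s, p⟩ := c
  obtain ⟨hn0, hns, hch, hp1, hpos⟩ := h
  simp only at hn0 hns hch hp1 hpos
  show comboCaseA (n, m', s, p) = comboCaseB (n, m', s, p)
  simp only [comboCaseA, comboCaseB]
  set sL := s.toList with hsL
  set N := n.toNat with hNdef
  have hNn : (N : Int) = n := by omega
  have hNle : N ≤ sL.length := by omega
  set L := sL.take N with hLdef
  have hLN : L.length = N := by rw [hLdef, List.length_take]; omega
  -- characterize A's difference array
  have hdiff : (p.foldl (fun ps pos =>
      let ps := PySem.List.pySetD ps 0 (PySem.List.pyGetD ps 0 0 + 1)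
      if pos < n then PySem.List.pySetD ps pos (PySem.List.pyGetD ps pos 0 - 1) else ps)
      (List.replicate N (0 : Int))).length = N ∧
      ∀ i < N, (p.foldl (fun ps pos =>
      let ps := PySem.List.pySetD ps 0 (PySem.List.pyGetD ps 0 0 + 1)
      if pos < n then PySem.List.pySetD ps pos (PySem.List.pyGetD ps pos 0 - 1) else ps)
      (List.replicate N (0 : Int))).getD i 0
      = (p.length : Int) * (if i = 0 then 1 else 0)
        - (p.countP (fun pos => decide (pos < n) && decide (wIdx N pos = i)) : Int) := by
    rcases eq_or_ne p [] with rfl | hpne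
    · exact ⟨by simp, fun i hi => by simp⟩
    · obtain ⟨H1, H2⟩ := diffLoop n N hNn (hp1 hpne) p hpos (List.replicate N (0 : Int)) (by simp)
      exact ⟨H1, fun i hi => by rw [H2 i hi]; simp⟩
  set ps1 := p.foldl (fun ps pos =>
      let ps := PySem.List.pySetD ps 0 (PySem.List.pyGetD ps 0 0 + 1)
      if pos < n then PySem.List.pySetD ps pos (PySem.List.pyGetD ps pos 0 - 1) else ps)
      (List.replicate N (0 : Int)) with hps1def
  obtain ⟨hd1, hd2⟩ := hdiff
  obtain ⟨hq1, hq2⟩ := prefLoop n N hNn ps1 hd1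
  set ps2 := (PySem.List.pyRange 1 n 1).foldl (fun ps i =>
      PySem.List.pySetD ps i (PySem.List.pyGetD ps i 0 + PySem.List.pyGetD ps (i - 1) 0)) ps1
    with hps2def
  have hC : ∀ i < N, ps2.getD i 0
      = ((p.countP (fun pos => decide (i < covN n N pos))) : Int) := by
    intro i hi
    rw [hq2 i hi]
    rw [Finset.sum_congr rfl
      (fun j hj => hd2 j (by have := Finset.mem_range.mp hj; omega)), Finset.sum_sub_distrib]
    have h1 : ∑ j ∈ Finset.range (i + 1), (p.length : Int) * (if j = 0 then 1 else 0)
        = (p.length : Int) := by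
      rw [Finset.sum_congr rfl (fun j _ => (by split_ifs <;> ring :
        (p.length : Int) * (if j = 0 then 1 else 0) = (if j = 0 then (p.length : Int) else 0))),
        Finset.sum_ite_eq' (Finset.range (i + 1)) 0 (fun _ => (p.length : Int))]
      simp
    have h2 : ∑ j ∈ Finset.range (i + 1),
        ((p.countP (fun pos => decide (pos < n) && decide (wIdx N pos = j))) : Int)
        = ((p.countP (fun pos => decide (pos < n) && decide (wIdx N pos < i + 1))) : Int) := by
      rw [← Nat.cast_sum, sumCount]
    rw [h1, h2]
    have hsplit := countP_not_sum p (fun pos => decide (pos < n) && decide (wIdx N pos < i + 1))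
    have hcong : p.countP (fun pos => !(decide (pos < n) && decide (wIdx N pos < i + 1)))
        = p.countP (fun pos => decide (i < covN n N pos)) := by
      apply List.countP_congr
      intro pos hp
      by_cases hpn : pos < n
      · simp only [covN, if_pos hpn, hpn, decide_true, Bool.true_and, Bool.not_eq_true',
          decide_eq_false_iff_not, decide_eq_true_eq]
        by_cases hw : wIdx N pos < i + 1
        · simp [hw]; omega
        · simp [hw]; omega
      · simp only [covN, if_neg hpn, hpn, decide_false, Bool.false_and, Bool.not_false]
        simp [hi]
    rw [← hcong]
    omega
  have hgdLsL : ∀ i < N, L.getD i ' ' = sL.getD i ' ' := by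
    intro i hi
    rw [hLdef, List.getD_eq_getElem _ _ (by rw [List.length_take]; omega),
      List.getD_eq_getElem _ _ (by omega), List.getElem_take]
  have hcN : ∀ i < N, 71 ≤ (sL.getD i ' ').toNat ∧ (sL.getD i ' ').toNat ≤ 122 := by
    intro i hi
    rw [← hgdLsL i hi]
    refine hch _ ?_
    rw [List.getD_eq_getElem _ _ (by omega)]
    exact List.getElem_mem _
  have hcL : ∀ ch ∈ L, 71 ≤ ch.toNat ∧ ch.toNat ≤ 122 := hch
  obtain ⟨hf1, hf2⟩ := freqLoopAux N sL ps2 hcN N le_rfl (List.replicate 26 (0 : Int)) (by simp)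
  have hr0 : PySem.List.pyRange 0 n 1 = (List.range N).map (fun k : Nat => (k : Int)) := by
    rw [PySem.List.pyRange_zero, ← hNdef]
  have hcombo : PySem.List.slice sL none (some n) = L := by
    rw [PySem.List.slice_to _ hn0, ← hNdef]
  rw [hr0, hcombo]
  obtain ⟨hb1, hb2⟩ := bLoop p L n N hLN hNn hpos hcL (List.replicate 26 (0 : Int)) (by simp)
  obtain ⟨hbb1, hbb2⟩ := bumpList L _ hb1 hcL
  suffices hfr : (((List.range N).map (fun k : Nat => (k : Int))).foldl (fun fr i =>
      let idx := ((PySem.List.pyGetD sL i ' ').toNat : Int) - 97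
      PySem.List.pySetD fr idx (PySem.List.pyGetD fr idx 0 + (PySem.List.pyGetD ps2 i 0 + 1)))
      (List.replicate 26 (0 : Int)))
      = (L.foldl (fun fr ch =>
          PySem.List.pySetD fr ((ch.toNat : Int) - 97)
            (PySem.List.pyGetD fr ((ch.toNat : Int) - 97) 0 + 1))
        (p.foldl (fun fr pos =>
          (PySem.List.slice L none (some pos)).foldl (fun fr ch =>
            PySem.List.pySetD fr ((ch.toNat : Int) - 97)
              (PySem.List.pyGetD fr ((ch.toNat : Int) - 97) 0 + 1)) fr)
          (List.replicate 26 (0 : Int)))) by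
    rw [hfr]
  apply List.ext_getElem (by rw [hf1, hbb1])
  intro j hj1 hj2
  have hj26 : j < 26 := by rw [hf1] at hj1; exact hj1
  rw [← List.getD_eq_getElem _ 0 hj1, ← List.getD_eq_getElem _ 0 hj2,
    hf2 j hj26, hbb2 j hj26, hb2 j hj26]
  have hrep : (List.replicate 26 (0 : Int)).getD j 0 = 0 := by
    rw [List.getD_eq_getElem _ _ (by simpa using hj26), List.getElem_replicate]
  rw [hrep]
  have hsum : ∑ i ∈ Finset.range N,
      (if eIdx (sL.getD i ' ') = j then ps2.getD i 0 + 1 else 0)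
      = ∑ i ∈ Finset.range N,
        ((if eIdx (L.getD i ' ') = j
            then ((p.countP (fun pos => decide (i < covN n N pos))) : Int) else 0)
          + (if eIdx (L.getD i ' ') = j then (1 : Int) else 0)) := by
    refine Finset.sum_congr rfl (fun i hi => ?_)
    have hiN : i < N := Finset.mem_range.mp hi
    rw [hgdLsL i hiN, hC i hiN]
    split_ifs <;> ring
  rw [hsum, Finset.sum_add_distrib, swapSum p L n N hLN hNn hpos j]
  have hcnt : ∑ i ∈ Finset.range N, (if eIdx (L.getD i ' ') = j then (1 : Int) else 0)
      = ((L.countP (fun ch => eIdx ch == j)) : Int) := by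
    rw [countP_getD L (fun ch => eIdx ch == j) ' ', hLN]
    exact Finset.sum_congr rfl (fun i _ => by simp)
  rw [hcnt]
  ring

-- negative declared length with an empty slice: both sides count nothing
theorem comboCase_deg (c : Int × Int × String × List Int)
    (hp : c.2.2.2 = []) (hn : c.1 < 0) (hs : (c.2.2.1.toList.length : Int) + c.1 ≤ 0) :
    comboCaseA c = comboCaseB c := by
  obtain ⟨n, m', s, p⟩ := c
  simp only at hp hn hs
  subst hp
  simp only [comboCaseA, comboCaseB]
  have hN0 : n.toNat = 0 := by omega
  have hr1 : PySem.List.pyRange 1 n 1 = [] := PySem.List.pyRange_one_eq_nil (by omega)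
  have hr0 : PySem.List.pyRange 0 n 1 = [] := PySem.List.pyRange_one_eq_nil (by omega)
  have hk0 : 0 < (-n).toNat := by omega
  have hsl := PySem.List.slice_to_neg_natCast s.toList (-n).toNat hk0
  rw [show -(((-n).toNat : Nat) : Int) = n from by omega] at hsl
  have hcombo : PySem.List.slice s.toList none (some n) = [] := by
    rw [hsl, show s.toList.length - (-n).toNat = 0 from by omega, List.take_zero]
  rw [hN0, hr1, hr0, hcombo]
  simp

-- ===== VERDICT (by name: the statement is the Claim_ definition above) =====
theorem perform_the_combo_spec : Claim_equal_perform_the_combo := by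
  intro t cases _hdom hpre
  unfold Spec_perform_the_combo perform_the_combo perform_the_combo_alt
  rw [PySem.List.foldl_append_singleton_eq_map, PySem.List.foldl_append_singleton_eq_map]
  simp only [List.nil_append]
  refine List.map_congr_left (fun c hc => ?_)
  obtain ⟨h1, h2, h3, h4, h5⟩ := hpre c hc
  rcases h1 with h1 | ⟨hpnil, hdeg⟩
  · refine comboCase_eq c ⟨h1, h2, fun ch hch => by simpa using List.all_eq_true.mp h3 ch hch,
      h4, fun pos hp => by simpa using List.all_eq_true.mp h5 pos hp⟩
  · rcases (by omega : 0 ≤ c.1 ∨ c.1 < 0) with h0 | h0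
    · refine comboCase_eq c ⟨h0, h2, fun ch hch => by simpa using List.all_eq_true.mp h3 ch hch,
        h4, fun pos hp => by simpa using List.all_eq_true.mp h5 pos hp⟩
    · exact comboCase_deg c hpnil h0 hdeg
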